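-- pv_equiv track=rewrite | github.com/haroldliao/article_writer_cw | article-writer-cw/engine/postprocess.py | extract_all_headings
-- ===== SOURCE A (Python) =====
-- def extract_all_headings(md: str) -> dict[str, list[str]]:
--     """
--     提取所有層級的標題
--     返回：{"h1": [...], "h2": [...], "h3": [...]}
--     """
--     headings = {"h1": [], "h2": [], "h3": []}
--
--     for line in md.splitlines():
--         if line.startswith("### "):
--             headings["h3"].append(line[4:].strip())
--         elif line.startswith("## "):
--             headings["h2"].append(line[3:].strip())
--         elif line.startswith("# "):
--             headings["h1"].append(line[2:].strip())
--
--     return headings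
-- ===== SOURCE B (Python) =====
-- def extract_all_headings(md: str) -> dict[str, list[str]]:
--     """Staged passes: one filtering pass per heading level, assembled by a dict comprehension."""
--     lines = md.splitlines()
--     return {
--         f"h{n}": [line[n + 1:].strip() for line in lines if line.startswith("#" * n + " ")]
--         for n in (1, 2, 3)
--     }
-- ===== Notes on version B (the rewrite author's own statement) =====
-- stated objective: alternative
-- what changed: B replaces A's single pass mutating a three-key accumulator dict by three independent staged filter/map passes (one per heading level, prefix '#'*n + ' ') assembled with a dict comprehension; correct because the three prefixes are mutually exclusive, so each line lands in at most one list either way.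
import Mathlib
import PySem

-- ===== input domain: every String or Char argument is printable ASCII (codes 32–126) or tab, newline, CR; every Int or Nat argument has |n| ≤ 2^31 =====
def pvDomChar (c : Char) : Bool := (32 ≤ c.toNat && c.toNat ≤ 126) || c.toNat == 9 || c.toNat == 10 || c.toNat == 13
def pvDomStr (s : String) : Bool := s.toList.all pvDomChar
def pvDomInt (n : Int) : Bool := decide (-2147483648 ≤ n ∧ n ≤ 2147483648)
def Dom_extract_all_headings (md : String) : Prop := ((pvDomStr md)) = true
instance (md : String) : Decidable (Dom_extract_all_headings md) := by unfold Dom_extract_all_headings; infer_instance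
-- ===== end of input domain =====

-- B replaces A's single accumulator pass by three independent filter/map passes (one per level)
-- assembled by a dict comprehension; equal output, same asymptotic cost ('alternative').

-- ===== PORT A =====
def extract_all_headings (md : String) : List (String × List String) :=
  let headings : PySem.Dict String (List String) :=
    PySem.Dict.ofList [("h1", []), ("h2", []), ("h3", [])]
  let headings := (PySem.Str.splitlines md).foldl (fun h line =>
    if PySem.Str.startswith line "### " then
      h.modify "h3" [] (· ++ [PySem.Str.strip (PySem.Str.slice line (some 4) none)])
    else if PySem.Str.startswith line "## " then
      h.modify "h2" [] (· ++ [PySem.Str.strip (PySem.Str.slice line (some 3) none)])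
    else if PySem.Str.startswith line "# " then
      h.modify "h1" [] (· ++ [PySem.Str.strip (PySem.Str.slice line (some 2) none)])
    else h) headings
  headings.items

-- ===== PORT B =====
-- "#" * n + " " ported as String.mk (List.replicate n '#' ++ [' ']) (exact on Dom);
-- the dict comprehension over (1, 2, 3) is the map below, fed to Dict.ofList.
def extract_all_headings_alt (md : String) : List (String × List String) :=
  let lines := PySem.Str.splitlines md
  (PySem.Dict.ofList (([1, 2, 3] : List Int).map (fun n =>
    ("h" ++ PySem.Int.toStr n,
     (lines.filter (fun line =>
        PySem.Str.startswith line (String.mk (List.replicate n.toNat '#' ++ [' '])))).map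
       (fun line => PySem.Str.strip (PySem.Str.slice line (some (n + 1)) none)))))).items

-- ===== PRECONDITION & SPEC =====
def Spec_extract_all_headings (md : String) (out : List (String × List String)) : Prop := out = extract_all_headings_alt md
instance (md : String) (out : List (String × List String)) : Decidable (Spec_extract_all_headings md out) := by unfold Spec_extract_all_headings; infer_instance

-- ===== CLAIM (what is proved, stated in full; the proofs are below) =====
def Claim_equal_extract_all_headings : Prop := ∀ (md : String), Dom_extract_all_headings md → Spec_extract_all_headings md (extract_all_headings md)

-- ===== LEMMAS AND PROOFS =====

-- the three heading prefixes are mutually exclusive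
theorem not_sw2_of_sw3 (l : String) (h : PySem.Str.startswith l "### " = true) :
    PySem.Str.startswith l "## " = false := by
  simp only [PySem.Str.startswith_eq] at *
  rw [PySem.Chars.startswith_iff] at h
  obtain ⟨t, ht⟩ := h
  rcases hb : PySem.Chars.startswith l.toList "## ".toList with _ | _
  · rfl
  · rw [PySem.Chars.startswith_iff] at hb
    obtain ⟨t2, ht2⟩ := hb
    rw [← ht] at ht2
    have eb : ("### " : String).toList = ['#','#','#',' '] := rfl
    have es : ("## " : String).toList = ['#','#',' '] := rfl
    rw [eb, es] at ht2
    simp at ht2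

theorem not_sw1_of_sw3 (l : String) (h : PySem.Str.startswith l "### " = true) :
    PySem.Str.startswith l "# " = false := by
  simp only [PySem.Str.startswith_eq] at *
  rw [PySem.Chars.startswith_iff] at h
  obtain ⟨t, ht⟩ := h
  rcases hb : PySem.Chars.startswith l.toList "# ".toList with _ | _
  · rfl
  · rw [PySem.Chars.startswith_iff] at hb
    obtain ⟨t2, ht2⟩ := hb
    rw [← ht] at ht2
    have eb : ("### " : String).toList = ['#','#','#',' '] := rfl
    have es : ("# " : String).toList = ['#',' '] := rfl
    rw [eb, es] at ht2
    simp at ht2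

theorem not_sw1_of_sw2 (l : String) (h : PySem.Str.startswith l "## " = true) :
    PySem.Str.startswith l "# " = false := by
  simp only [PySem.Str.startswith_eq] at *
  rw [PySem.Chars.startswith_iff] at h
  obtain ⟨t, ht⟩ := h
  rcases hb : PySem.Chars.startswith l.toList "# ".toList with _ | _
  · rfl
  · rw [PySem.Chars.startswith_iff] at hb
    obtain ⟨t2, ht2⟩ := hb
    rw [← ht] at ht2
    have eb : ("## " : String).toList = ['#','#',' '] := rfl
    have es : ("# " : String).toList = ['#',' '] := rfl
    rw [eb, es] at ht2
    simp at ht2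

-- shorthands for A's step and B's per-level filtered pass
def pvStep (h : PySem.Dict String (List String)) (line : String) : PySem.Dict String (List String) :=
  if PySem.Str.startswith line "### " then
    h.modify "h3" [] (· ++ [PySem.Str.strip (PySem.Str.slice line (some 4) none)])
  else if PySem.Str.startswith line "## " then
    h.modify "h2" [] (· ++ [PySem.Str.strip (PySem.Str.slice line (some 3) none)])
  else if PySem.Str.startswith line "# " then
    h.modify "h1" [] (· ++ [PySem.Str.strip (PySem.Str.slice line (some 2) none)])
  else h

def pvPass (p : String) (k : Int) (lines : List String) : List String :=
  (lines.filter (fun line => PySem.Str.startswith line p)).map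
    (fun line => PySem.Str.strip (PySem.Str.slice line (some k) none))

-- loop invariant: A's fold over a literal three-key dict equals B's three staged passes
theorem fold_invariant (lines : List String) (v1 v2 v3 : List String) :
    lines.foldl pvStep (PySem.Dict.ofList [("h1", v1), ("h2", v2), ("h3", v3)])
      = PySem.Dict.ofList [("h1", v1 ++ pvPass "# " 2 lines),
                           ("h2", v2 ++ pvPass "## " 3 lines),
                           ("h3", v3 ++ pvPass "### " 4 lines)] := by
  induction lines generalizing v1 v2 v3 with
  | nil => simp [pvPass]
  | cons line rest ih =>
    simp only [List.foldl_cons]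
    have hstep : pvStep (PySem.Dict.ofList [("h1", v1), ("h2", v2), ("h3", v3)]) line
        = PySem.Dict.ofList
            [("h1", v1 ++ (if PySem.Str.startswith line "# " then [PySem.Str.strip (PySem.Str.slice line (some 2) none)] else [])),
             ("h2", v2 ++ (if PySem.Str.startswith line "## " then [PySem.Str.strip (PySem.Str.slice line (some 3) none)] else [])),
             ("h3", v3 ++ (if PySem.Str.startswith line "### " then [PySem.Str.strip (PySem.Str.slice line (some 4) none)] else []))] := by
      unfold pvStep
      rcases h3 : PySem.Str.startswith line "### " with _ | _
      · rcases h2 : PySem.Str.startswith line "## " with _ | _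
        · rcases h1 : PySem.Str.startswith line "# " with _ | _
          · simp only [h1, if_false, Bool.false_eq_true, List.append_nil]
          · simp only [if_false, Bool.false_eq_true, List.append_nil]
            rfl
        · simp only [not_sw1_of_sw2 _ h2, if_true, if_false, Bool.false_eq_true,
            List.append_nil]
          rfl
      · simp only [not_sw2_of_sw3 _ h3, not_sw1_of_sw3 _ h3, if_true, if_false,
          Bool.false_eq_true, List.append_nil]
        rfl
    rw [hstep, ih]
    simp only [pvPass, List.filter_cons]
    split_ifs <;> simp_all

-- ===== VERDICT (by name: the statement is the Claim_ definition above) =====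
theorem extract_all_headings_spec : Claim_equal_extract_all_headings := by
  intro md _
  unfold Spec_extract_all_headings extract_all_headings extract_all_headings_alt
  show ((PySem.Str.splitlines md).foldl pvStep
      (PySem.Dict.ofList [("h1", []), ("h2", []), ("h3", [])])).items = _
  rw [fold_invariant]
  rfl
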